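-- pv_equiv track=rewrite | github.com/ergs/transmutagen | transmutagen/gensolve.py | make_ijk
-- ===== SOURCE A (Python) =====
-- def make_ijk(ij, N):
--     ijk = ij.copy()
--     idx = len(ij)
--     for i in range(N):
--         for j in range(i+1, N):
--             if (j, i) not in ijk:
--                 continue
--             for k in range(i+1, N):
--                 if (i, k) in ijk and (j, k) not in ijk:
--                     ijk[j, k] = idx
--                     idx += 1
--     return ijk
-- ===== SOURCE B (Python) =====
-- def make_ijk(ij, N):
--     ijk = ij.copy()
--     idx = len(ij)
--     rows = {}
--     cols = {}
--     for (r, c) in ij: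
--         if 0 <= c < r < N:
--             cols.setdefault(c, set()).add(r)
--         elif 0 <= r < c < N:
--             rows.setdefault(r, set()).add(c)
--     for i in range(N):
--         cs = sorted(cols.get(i, ()))
--         rs = sorted(rows.get(i, ()))
--         for j in cs:
--             for k in rs:
--                 if (j, k) not in ijk:
--                     ijk[j, k] = idx
--                     idx += 1
--                     if k < j:
--                         cols.setdefault(k, set()).add(j)
--                     elif j < k:
--                         rows.setdefault(j, set()).add(k)
--     return ijk
-- ===== Notes on version B (the rewrite author's own statement) =====
-- stated objective: faster
-- what changed: B replaces A's dense triple loop over range(i+1,N) with sparse symbolic LU factorization: it builds per-pivot lists of actual sub-diagonal column and super-diagonal row entries once, keeps them updated as fill-in appears, and at each pivot iterates only those sorted nonzero lists, producing fill entries in the same ascending (i,j,k) order.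
import Mathlib
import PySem

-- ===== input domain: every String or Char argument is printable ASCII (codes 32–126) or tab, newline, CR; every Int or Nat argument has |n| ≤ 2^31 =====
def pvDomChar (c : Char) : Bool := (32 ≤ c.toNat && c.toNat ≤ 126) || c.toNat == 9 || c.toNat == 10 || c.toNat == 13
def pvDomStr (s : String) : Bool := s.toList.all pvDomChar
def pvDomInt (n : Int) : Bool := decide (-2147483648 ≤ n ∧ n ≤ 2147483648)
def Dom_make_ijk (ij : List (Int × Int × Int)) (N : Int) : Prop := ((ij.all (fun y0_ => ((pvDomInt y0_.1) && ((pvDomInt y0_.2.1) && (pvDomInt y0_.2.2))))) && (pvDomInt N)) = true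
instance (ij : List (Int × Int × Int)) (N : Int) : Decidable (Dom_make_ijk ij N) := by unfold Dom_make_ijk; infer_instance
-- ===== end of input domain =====

-- B: sparse symbolic LU fill-in — per pivot iterate only the recorded nonzero sub-diagonal column
-- and super-diagonal row entries (maintained incrementally) instead of A's full range(i+1, N) scans.

-- ===== PORT A =====
-- A's k-loop body: 'if (i, k) in ijk and (j, k) not in ijk: ijk[j, k] = idx; idx += 1'
def pvInnerA (i j : Int) (st : PySem.Dict (Int × Int) Int × Int) (k : Int) :
    PySem.Dict (Int × Int) Int × Int :=
  if st.1.contains (i, k) && !st.1.contains (j, k) then (st.1.insert (j, k) st.2, st.2 + 1) else st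

-- A's pivot body: 'for j in range(i+1, N): if (j, i) not in ijk: continue; for k in range(i+1, N): …'
def pvStepA (N : Int) (st : PySem.Dict (Int × Int) Int × Int) (i : Int) :
    PySem.Dict (Int × Int) Int × Int :=
  (PySem.List.pyRange (i + 1) N 1).foldl (fun st j =>
    if ¬ st.1.contains (j, i) then st
    else (PySem.List.pyRange (i + 1) N 1).foldl (pvInnerA i j) st) st

def make_ijk (ij : List (Int × Int × Int)) (N : Int) : List (Int × Int × Int) :=
  let d0 : PySem.Dict (Int × Int) Int :=
    PySem.Dict.ofList (ij.map (fun t => ((t.1, t.2.1), t.2.2)))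
  let st := (PySem.List.pyRange 0 N 1).foldl (pvStepA N) (d0, (d0.size : Int))
  st.1.items.map (fun p => (p.1.1, p.1.2, p.2))

-- ===== PORT B =====
-- B's structure pass: 'if 0 <= c < r < N: cols.setdefault(c, set()).add(r) elif 0 <= r < c < N: rows.setdefault(r, set()).add(c)'
def pvBuildRC (N : Int) (rc : PySem.Dict Int (List Int) × PySem.Dict Int (List Int)) (p : Int × Int) :
    PySem.Dict Int (List Int) × PySem.Dict Int (List Int) :=
  if 0 ≤ p.2 ∧ p.2 < p.1 ∧ p.1 < N then (rc.1, rc.2.modify p.2 [] (fun s => PySem.Set.add s p.1))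
  else if 0 ≤ p.1 ∧ p.1 < p.2 ∧ p.2 < N then (rc.1.modify p.1 [] (fun s => PySem.Set.add s p.2), rc.2)
  else rc

-- B's fill body: 'if (j, k) not in ijk: ijk[j, k] = idx; idx += 1; (update cols/rows)'
def pvInnerB (j : Int)
    (st : (PySem.Dict (Int × Int) Int × Int) × (PySem.Dict Int (List Int) × PySem.Dict Int (List Int)))
    (k : Int) :
    (PySem.Dict (Int × Int) Int × Int) × (PySem.Dict Int (List Int) × PySem.Dict Int (List Int)) :=
  if st.1.1.contains (j, k) then st
  else
    let st1 := (st.1.1.insert (j, k) st.1.2, st.1.2 + 1)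
    if k < j then (st1, (st.2.1, st.2.2.modify k [] (fun s => PySem.Set.add s j)))
    else if j < k then (st1, (st.2.1.modify j [] (fun s => PySem.Set.add s k), st.2.2))
    else (st1, st.2)

-- B's pivot body: 'cs = sorted(cols.get(i, ())); rs = sorted(rows.get(i, ())); for j in cs: for k in rs: …'
def pvStepB
    (st : (PySem.Dict (Int × Int) Int × Int) × (PySem.Dict Int (List Int) × PySem.Dict Int (List Int)))
    (i : Int) :
    (PySem.Dict (Int × Int) Int × Int) × (PySem.Dict Int (List Int) × PySem.Dict Int (List Int)) :=
  let cs := PySem.List.sorted (st.2.2.getD i []) (fun x => x) false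
  let rs := PySem.List.sorted (st.2.1.getD i []) (fun x => x) false
  cs.foldl (fun st j => rs.foldl (pvInnerB j) st) st

def make_ijk_alt (ij : List (Int × Int × Int)) (N : Int) : List (Int × Int × Int) :=
  let d0 : PySem.Dict (Int × Int) Int :=
    PySem.Dict.ofList (ij.map (fun t => ((t.1, t.2.1), t.2.2)))
  let rc := d0.keys.foldl (pvBuildRC N) (PySem.Dict.empty, PySem.Dict.empty)
  let fin := (PySem.List.pyRange 0 N 1).foldl pvStepB ((d0, (d0.size : Int)), rc)
  fin.1.1.items.map (fun p => (p.1.1, p.1.2, p.2))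

-- ===== PRECONDITION & SPEC =====
def Spec_make_ijk (ij : List (Int × Int × Int)) (N : Int) (out : List (Int × Int × Int)) : Prop := out = make_ijk_alt ij N
instance (ij : List (Int × Int × Int)) (N : Int) (out : List (Int × Int × Int)) : Decidable (Spec_make_ijk ij N out) := by unfold Spec_make_ijk; infer_instance

-- ===== CLAIM (what is proved, stated in full; the proofs are below) =====
def Claim_equal_make_ijk : Prop := ∀ (ij : List (Int × Int × Int)) (N : Int), Dom_make_ijk ij N → Spec_make_ijk ij N (make_ijk ij N)

-- ===== LEMMAS AND PROOFS =====

theorem pv_contains_insert_iff (d : PySem.Dict (Int × Int) Int) (p q : Int × Int) (v : Int) :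
    ((d.insert q v).contains p = true) ↔ (p = q ∨ d.contains p = true) := by
  rw [PySem.Dict.contains_insert]; simp

def pvP (a : Int) (d d' : PySem.Dict (Int × Int) Int) : Prop :=
  ∀ x y : Int, x ≤ a ∨ y ≤ a → d'.contains (x, y) = d.contains (x, y)

def pvGOOD (N : Int) (d : PySem.Dict (Int × Int) Int)
    (rows cols : PySem.Dict Int (List Int)) (m : Int) : Prop :=
  ∀ i : Int, m ≤ i →
    ((cols.getD i []).Nodup ∧ ∀ x : Int, x ∈ cols.getD i [] ↔ (i < x ∧ x < N ∧ d.contains (x, i) = true)) ∧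
    ((rows.getD i []).Nodup ∧ ∀ x : Int, x ∈ rows.getD i [] ↔ (i < x ∧ x < N ∧ d.contains (i, x) = true))

theorem pvP_insert (a j k : Int) (haj : a < j) (hak : a < k)
    (d d' : PySem.Dict (Int × Int) Int) (h : pvP a d d') (v : Int) :
    pvP a d (d'.insert (j, k) v) := by
  intro x y hxy
  rw [PySem.Dict.contains_insert]
  have hne : ((x, y) == (j, k)) = false := by
    rw [beq_eq_false_iff_ne]
    intro he
    rw [Prod.mk.injEq] at he
    omega
  rw [hne, Bool.false_or]
  exact h x y hxy

theorem pvGOOD_fill (N a j k : Int) (haj : a < j) (hjN : j < N) (hak : a < k) (hkN : k < N)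
    (d : PySem.Dict (Int × Int) Int) (rows cols : PySem.Dict Int (List Int)) (v : Int)
    (hG : pvGOOD N d rows cols (a + 1)) :
    pvGOOD N (d.insert (j, k) v)
      (if j < k then rows.modify j [] (fun s => PySem.Set.add s k) else rows)
      (if k < j then cols.modify k [] (fun s => PySem.Set.add s j) else cols) (a + 1) := by
  intro i hi
  obtain ⟨⟨hcn, hcm⟩, ⟨hrn, hrm⟩⟩ := hG i hi
  constructor
  · -- cols side
    by_cases hkj : k < j
    · rw [if_pos hkj, PySem.Dict.getD_modify]
      by_cases hik : i = k
      · subst hik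
        rw [if_pos rfl]
        refine ⟨PySem.Set.nodup_add _ _ hcn, ?_⟩
        intro x
        rw [PySem.Set.mem_add, hcm x, pv_contains_insert_iff]
        simp only [Prod.mk.injEq]
        constructor
        · rintro (⟨h1, h2, h3⟩ | rfl)
          · exact ⟨h1, h2, Or.inr h3⟩
          · exact ⟨hkj, hjN, Or.inl ⟨rfl, trivial⟩⟩
        · rintro ⟨h1, h2, (⟨rfl, -⟩ | h3)⟩
          · exact Or.inr rfl
          · exact Or.inl ⟨h1, h2, h3⟩
      · rw [if_neg hik]
        refine ⟨hcn, ?_⟩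
        intro x
        rw [hcm x, pv_contains_insert_iff]
        simp only [Prod.mk.injEq]
        constructor
        · rintro ⟨h1, h2, h3⟩; exact ⟨h1, h2, Or.inr h3⟩
        · rintro ⟨h1, h2, (⟨-, h⟩ | h3)⟩
          · exact absurd h hik
          · exact ⟨h1, h2, h3⟩
    · rw [if_neg hkj]
      refine ⟨hcn, ?_⟩
      intro x
      rw [hcm x, pv_contains_insert_iff]
      simp only [Prod.mk.injEq]
      constructor
      · rintro ⟨h1, h2, h3⟩; exact ⟨h1, h2, Or.inr h3⟩
      · rintro ⟨h1, h2, (⟨rfl, rfl⟩ | h3)⟩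
        · omega
        · exact ⟨h1, h2, h3⟩
  · -- rows side
    by_cases hjk : j < k
    · rw [if_pos hjk, PySem.Dict.getD_modify]
      by_cases hij : i = j
      · subst hij
        rw [if_pos rfl]
        refine ⟨PySem.Set.nodup_add _ _ hrn, ?_⟩
        intro x
        rw [PySem.Set.mem_add, hrm x, pv_contains_insert_iff]
        simp only [Prod.mk.injEq]
        constructor
        · rintro (⟨h1, h2, h3⟩ | rfl)
          · exact ⟨h1, h2, Or.inr h3⟩
          · exact ⟨hjk, hkN, Or.inl ⟨trivial, rfl⟩⟩
        · rintro ⟨h1, h2, (⟨-, rfl⟩ | h3)⟩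
          · exact Or.inr rfl
          · exact Or.inl ⟨h1, h2, h3⟩
      · rw [if_neg hij]
        refine ⟨hrn, ?_⟩
        intro x
        rw [hrm x, pv_contains_insert_iff]
        simp only [Prod.mk.injEq]
        constructor
        · rintro ⟨h1, h2, h3⟩; exact ⟨h1, h2, Or.inr h3⟩
        · rintro ⟨h1, h2, (⟨h, -⟩ | h3)⟩
          · exact absurd h hij
          · exact ⟨h1, h2, h3⟩
    · rw [if_neg hjk]
      refine ⟨hrn, ?_⟩
      intro x
      rw [hrm x, pv_contains_insert_iff]
      simp only [Prod.mk.injEq]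
      constructor
      · rintro ⟨h1, h2, h3⟩; exact ⟨h1, h2, Or.inr h3⟩
      · rintro ⟨h1, h2, (⟨rfl, rfl⟩ | h3)⟩
        · omega
        · exact ⟨h1, h2, h3⟩
theorem pv_sorted_cols (N a : Int) (d : PySem.Dict (Int × Int) Int) (xs : List Int)
    (hnd : xs.Nodup)
    (hmem : ∀ x : Int, x ∈ xs ↔ (a < x ∧ x < N ∧ d.contains (x, a) = true)) :
    PySem.List.sorted xs (fun x => x) false
      = (PySem.List.pyRange (a + 1) N 1).filter (fun j => d.contains (j, a)) := by
  apply PySem.List.sorted_eq_of_perm_of_pairwise_lt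
  · rw [List.perm_ext_iff_of_nodup (List.Nodup.filter _ (PySem.List.nodup_pyRange_one _ _)) hnd]
    intro x
    rw [List.mem_filter, PySem.List.mem_pyRange_one, hmem]
    constructor
    · rintro ⟨⟨h1, h2⟩, h3⟩; exact ⟨by omega, h2, h3⟩
    · rintro ⟨h1, h2, h3⟩; exact ⟨⟨by omega, h2⟩, h3⟩
  · exact List.Pairwise.sublist List.filter_sublist (PySem.List.pairwise_lt_pyRange_one _ _)

def pvQ (N a : Int) (d : PySem.Dict (Int × Int) Int)
    (r : (PySem.Dict (Int × Int) Int × Int) × (PySem.Dict Int (List Int) × PySem.Dict Int (List Int))) : Prop :=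
  pvP a d r.1.1 ∧ r.1.1.keys.Nodup ∧ pvGOOD N r.1.1 r.2.1 r.2.2 (a + 1)

theorem pv_inner (N a j : Int) (d : PySem.Dict (Int × Int) Int) (haj : a < j) (hjN : j < N) :
    ∀ ks : List Int, (∀ k ∈ ks, a < k ∧ k < N) →
    ∀ st, pvQ N a d st →
      (List.foldl (pvInnerB j) st (ks.filter (fun k => d.contains (a, k)))).1
          = List.foldl (pvInnerA a j) st.1 ks
      ∧ pvQ N a d (List.foldl (pvInnerB j) st (ks.filter (fun k => d.contains (a, k)))) := by
  intro ks
  induction ks with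
  | nil => intro _ st hq; exact ⟨rfl, hq⟩
  | cons k ks ih =>
    intro hk st hq
    obtain ⟨hak, hkN⟩ := hk k List.mem_cons_self
    have hks : ∀ k ∈ ks, a < k ∧ k < N := fun k hm => hk k (List.mem_cons_of_mem _ hm)
    obtain ⟨hP, hNd, hG⟩ := hq
    have hlive : st.1.1.contains (a, k) = d.contains (a, k) := hP a k (Or.inl le_rfl)
    rw [List.filter_cons]
    by_cases hc : d.contains (a, k) = true
    · rw [if_pos (by exact hc), List.foldl_cons, List.foldl_cons]
      by_cases hjk : st.1.1.contains (j, k) = true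
      · have hA : pvInnerA a j st.1 k = st.1 := by
          simp [pvInnerA, hlive.trans hc, hjk]
        have hB : pvInnerB j st k = st := by simp [pvInnerB, hjk]
        rw [hA, hB]
        exact ih hks st ⟨hP, hNd, hG⟩
      · have hjk' : st.1.1.contains (j, k) = false := by simpa using hjk
        have hA : pvInnerA a j st.1 k = (st.1.1.insert (j, k) st.1.2, st.1.2 + 1) := by
          simp [pvInnerA, hlive.trans hc, hjk']
        have hP' := pvP_insert a j k haj hak d st.1.1 hP st.1.2
        have hNd' := PySem.Dict.nodup_keys_insert st.1.1 (j, k) st.1.2 hNd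
        have hG' := pvGOOD_fill N a j k haj hjN hak hkN st.1.1 st.2.1 st.2.2 st.1.2 hG
        rcases lt_trichotomy k j with hkj | heq | hjk2
        · have hst' : pvInnerB j st k
              = ((st.1.1.insert (j, k) st.1.2, st.1.2 + 1),
                 (st.2.1, st.2.2.modify k [] (fun s => PySem.Set.add s j))) := by
            simp [pvInnerB, hjk', hkj]
          rw [if_neg (by omega : ¬ j < k), if_pos hkj] at hG'
          rw [hA, hst']
          exact ih hks _ ⟨hP', hNd', hG'⟩
        · have hst' : pvInnerB j st k = ((st.1.1.insert (j, k) st.1.2, st.1.2 + 1), st.2) := by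
            subst heq
            simp [pvInnerB, hjk']
          rw [if_neg (by omega : ¬ j < k), if_neg (by omega : ¬ k < j)] at hG'
          rw [hA, hst']
          exact ih hks _ ⟨hP', hNd', hG'⟩
        · have hst' : pvInnerB j st k
              = ((st.1.1.insert (j, k) st.1.2, st.1.2 + 1),
                 (st.2.1.modify j [] (fun s => PySem.Set.add s k), st.2.2)) := by
            simp [pvInnerB, hjk', hjk2, lt_asymm hjk2]
          rw [if_pos hjk2, if_neg (by omega : ¬ k < j)] at hG'
          rw [hA, hst']
          exact ih hks _ ⟨hP', hNd', hG'⟩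
    · rw [if_neg hc, List.foldl_cons]
      have hA : pvInnerA a j st.1 k = st.1 := by
        have h0 : st.1.1.contains (a, k) = false := by
          rw [hlive]; exact Bool.not_eq_true _ ▸ hc
        simp [pvInnerA, h0]
      rw [hA]
      exact ih hks st ⟨hP, hNd, hG⟩

theorem pv_outer (N a : Int) (d : PySem.Dict (Int × Int) Int) (rs : List Int)
    (hrs : rs = (PySem.List.pyRange (a + 1) N 1).filter (fun k => d.contains (a, k))) :
    ∀ js : List Int, (∀ j ∈ js, a < j ∧ j < N) →
    ∀ st, pvQ N a d st →
      (List.foldl (fun st j => List.foldl (pvInnerB j) st rs) st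
          (js.filter (fun j => d.contains (j, a)))).1
        = List.foldl (fun st j =>
            if ¬ st.1.contains (j, a) then st
            else List.foldl (pvInnerA a j) st (PySem.List.pyRange (a + 1) N 1)) st.1 js
      ∧ pvQ N a d (List.foldl (fun st j => List.foldl (pvInnerB j) st rs) st
          (js.filter (fun j => d.contains (j, a)))) := by
  intro js
  induction js with
  | nil => intro _ st hq; exact ⟨rfl, hq⟩
  | cons j js ih =>
    intro hj st hq
    obtain ⟨haj, hjN⟩ := hj j List.mem_cons_self
    have hjs : ∀ j ∈ js, a < j ∧ j < N := fun j hm => hj j (List.mem_cons_of_mem _ hm)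
    have hlive : st.1.1.contains (j, a) = d.contains (j, a) := hq.1 j a (Or.inr le_rfl)
    rw [List.filter_cons]
    by_cases hc : d.contains (j, a) = true
    · rw [if_pos (by exact hc), List.foldl_cons, List.foldl_cons,
        if_neg (by rw [hlive, hc]; simp)]
      have hrange : ∀ k ∈ PySem.List.pyRange (a + 1) N 1, a < k ∧ k < N := by
        intro k hm
        rw [PySem.List.mem_pyRange_one] at hm
        omega
      obtain ⟨h1, h2⟩ := pv_inner N a j d haj hjN (PySem.List.pyRange (a + 1) N 1) hrange st hq
      rw [← hrs] at h1 h2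
      rw [← h1]
      exact ih hjs _ h2
    · rw [if_neg hc, List.foldl_cons,
        if_pos (by rw [hlive]; simpa using hc)]
      exact ih hjs st hq

theorem pv_sorted_rows (N a : Int) (d : PySem.Dict (Int × Int) Int) (xs : List Int)
    (hnd : xs.Nodup)
    (hmem : ∀ x : Int, x ∈ xs ↔ (a < x ∧ x < N ∧ d.contains (a, x) = true)) :
    PySem.List.sorted xs (fun x => x) false
      = (PySem.List.pyRange (a + 1) N 1).filter (fun k => d.contains (a, k)) := by
  apply PySem.List.sorted_eq_of_perm_of_pairwise_lt
  · rw [List.perm_ext_iff_of_nodup (List.Nodup.filter _ (PySem.List.nodup_pyRange_one _ _)) hnd]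
    intro x
    rw [List.mem_filter, PySem.List.mem_pyRange_one, hmem]
    constructor
    · rintro ⟨⟨h1, h2⟩, h3⟩; exact ⟨by omega, h2, h3⟩
    · rintro ⟨h1, h2, h3⟩; exact ⟨⟨by omega, h2⟩, h3⟩
  · exact List.Pairwise.sublist List.filter_sublist (PySem.List.pairwise_lt_pyRange_one _ _)

theorem pv_step (N a : Int)
    (st : (PySem.Dict (Int × Int) Int × Int) × (PySem.Dict Int (List Int) × PySem.Dict Int (List Int)))
    (hNd : st.1.1.keys.Nodup) (hg : pvGOOD N st.1.1 st.2.1 st.2.2 a) :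
    (pvStepB st a).1 = pvStepA N st.1 a
    ∧ (pvStepB st a).1.1.keys.Nodup
    ∧ pvGOOD N (pvStepB st a).1.1 (pvStepB st a).2.1 (pvStepB st a).2.2 (a + 1) := by
  obtain ⟨⟨hcn, hcm⟩, ⟨hrn, hrm⟩⟩ := hg a le_rfl
  have hcs := pv_sorted_cols N a st.1.1 (st.2.2.getD a []) hcn hcm
  have hrs := pv_sorted_rows N a st.1.1 (st.2.1.getD a []) hrn hrm
  have hrange : ∀ j ∈ PySem.List.pyRange (a + 1) N 1, a < j ∧ j < N := by
    intro j hm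
    rw [PySem.List.mem_pyRange_one] at hm
    omega
  have hq0 : pvQ N a st.1.1 st := ⟨fun x y _ => rfl, hNd, fun i hi => hg i (by omega)⟩
  have hout := pv_outer N a st.1.1
    (PySem.List.sorted (st.2.1.getD a []) (fun x => x) false) hrs
    (PySem.List.pyRange (a + 1) N 1) hrange st hq0
  have hB : pvStepB st a
      = List.foldl (fun s j => List.foldl (pvInnerB j) s
          (PySem.List.sorted (st.2.1.getD a []) (fun x => x) false)) st
        ((PySem.List.pyRange (a + 1) N 1).filter (fun j => st.1.1.contains (j, a))) := by
    simp only [pvStepB]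
    rw [hcs]
  rw [hB]
  exact ⟨hout.1, hout.2.2.1, hout.2.2.2⟩

theorem pv_main (N : Int) : ∀ (n : ℕ) (a : Int), (N - a).toNat = n →
    ∀ (st : (PySem.Dict (Int × Int) Int × Int) × (PySem.Dict Int (List Int) × PySem.Dict Int (List Int))),
      st.1.1.keys.Nodup → pvGOOD N st.1.1 st.2.1 st.2.2 a →
      ((PySem.List.pyRange a N 1).foldl pvStepB st).1
        = (PySem.List.pyRange a N 1).foldl (pvStepA N) st.1 := by
  intro n
  induction n with
  | zero =>
    intro a ha st _ _
    rw [PySem.List.pyRange_one_eq_nil (by omega)]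
    rfl
  | succ m ih =>
    intro a ha st hNd hg
    rw [PySem.List.pyRange_one_cons (by omega : a < N), List.foldl_cons, List.foldl_cons]
    obtain ⟨h1, h2, h3⟩ := pv_step N a st hNd hg
    rw [← h1]
    exact ih (a + 1) (by omega) (pvStepB st a) h2 h3

theorem pv_build (N : Int) : ∀ (l : List (Int × Int)) (rc : PySem.Dict Int (List Int) × PySem.Dict Int (List Int)),
    (∀ i : Int, (rc.2.getD i []).Nodup ∧ (rc.1.getD i []).Nodup) →
    ∀ i : Int,
      ((List.foldl (pvBuildRC N) rc l).2.getD i []).Nodup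
      ∧ ((List.foldl (pvBuildRC N) rc l).1.getD i []).Nodup
      ∧ (∀ x : Int, x ∈ (List.foldl (pvBuildRC N) rc l).2.getD i []
          ↔ (x ∈ rc.2.getD i [] ∨ ((x, i) ∈ l ∧ 0 ≤ i ∧ i < x ∧ x < N)))
      ∧ (∀ x : Int, x ∈ (List.foldl (pvBuildRC N) rc l).1.getD i []
          ↔ (x ∈ rc.1.getD i [] ∨ ((i, x) ∈ l ∧ 0 ≤ i ∧ i < x ∧ x < N))) := by
  intro l
  induction l with
  | nil =>
    intro rc h i
    refine ⟨(h i).1, (h i).2, ?_, ?_⟩ <;> intro x <;> simp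
  | cons p l ih =>
    intro rc h i
    rw [List.foldl_cons]
    have h' : ∀ i : Int, ((pvBuildRC N rc p).2.getD i []).Nodup ∧ ((pvBuildRC N rc p).1.getD i []).Nodup := by
      intro i
      unfold pvBuildRC
      split_ifs with h1 h2
      · constructor
        · rw [PySem.Dict.getD_modify]
          split_ifs with hip
          · subst hip
            exact PySem.Set.nodup_add _ _ (h p.2).1
          · exact (h i).1
        · exact (h i).2
      · constructor
        · exact (h i).1
        · rw [PySem.Dict.getD_modify]
          split_ifs with hip
          · subst hip
            exact PySem.Set.nodup_add _ _ (h p.1).2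
          · exact (h i).2
      · exact h i
    obtain ⟨g1, g2, g3, g4⟩ := ih (pvBuildRC N rc p) h' i
    refine ⟨g1, g2, ?_, ?_⟩
    · intro x
      rw [g3 x]
      unfold pvBuildRC
      split_ifs with h1 h2
      · rw [PySem.Dict.getD_modify]
        split_ifs with hip
        · subst hip
          rw [PySem.Set.mem_add]
          constructor
          · rintro ((hx | rfl) | hx)
            · exact Or.inl hx
            · exact Or.inr ⟨List.mem_cons_self, by omega⟩
            · exact Or.inr ⟨List.mem_cons_of_mem _ hx.1, hx.2⟩
          · rintro (hx | ⟨hm, hb⟩)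
            · exact Or.inl (Or.inl hx)
            · rcases List.mem_cons.mp hm with heq | hm'
              · rw [Prod.ext_iff] at heq
                exact Or.inl (Or.inr heq.1)
              · exact Or.inr ⟨hm', hb⟩
        · constructor
          · rintro (hx | hx)
            · exact Or.inl hx
            · exact Or.inr ⟨List.mem_cons_of_mem _ hx.1, hx.2⟩
          · rintro (hx | ⟨hm, hb⟩)
            · exact Or.inl hx
            · rcases List.mem_cons.mp hm with heq | hm'
              · exfalso
                rw [Prod.ext_iff] at heq
                exact hip (by omega)
              · exact Or.inr ⟨hm', hb⟩
      · constructor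
        · rintro (hx | hx)
          · exact Or.inl hx
          · exact Or.inr ⟨List.mem_cons_of_mem _ hx.1, hx.2⟩
        · rintro (hx | ⟨hm, hb⟩)
          · exact Or.inl hx
          · rcases List.mem_cons.mp hm with heq | hm'
            · exfalso
              rw [Prod.ext_iff] at heq
              omega
            · exact Or.inr ⟨hm', hb⟩
      · constructor
        · rintro (hx | hx)
          · exact Or.inl hx
          · exact Or.inr ⟨List.mem_cons_of_mem _ hx.1, hx.2⟩
        · rintro (hx | ⟨hm, hb⟩)
          · exact Or.inl hx
          · rcases List.mem_cons.mp hm with heq | hm'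
            · exfalso
              rw [Prod.ext_iff] at heq
              omega
            · exact Or.inr ⟨hm', hb⟩
    · intro x
      rw [g4 x]
      unfold pvBuildRC
      split_ifs with h1 h2
      · constructor
        · rintro (hx | hx)
          · exact Or.inl hx
          · exact Or.inr ⟨List.mem_cons_of_mem _ hx.1, hx.2⟩
        · rintro (hx | ⟨hm, hb⟩)
          · exact Or.inl hx
          · rcases List.mem_cons.mp hm with heq | hm'
            · exfalso
              rw [Prod.ext_iff] at heq
              omega
            · exact Or.inr ⟨hm', hb⟩
      · rw [PySem.Dict.getD_modify]
        split_ifs with hip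
        · subst hip
          rw [PySem.Set.mem_add]
          constructor
          · rintro ((hx | rfl) | hx)
            · exact Or.inl hx
            · exact Or.inr ⟨List.mem_cons_self, by omega⟩
            · exact Or.inr ⟨List.mem_cons_of_mem _ hx.1, hx.2⟩
          · rintro (hx | ⟨hm, hb⟩)
            · exact Or.inl (Or.inl hx)
            · rcases List.mem_cons.mp hm with heq | hm'
              · rw [Prod.ext_iff] at heq
                exact Or.inl (Or.inr heq.2)
              · exact Or.inr ⟨hm', hb⟩
        · constructor
          · rintro (hx | hx)
            · exact Or.inl hx
            · exact Or.inr ⟨List.mem_cons_of_mem _ hx.1, hx.2⟩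
          · rintro (hx | ⟨hm, hb⟩)
            · exact Or.inl hx
            · rcases List.mem_cons.mp hm with heq | hm'
              · exfalso
                rw [Prod.ext_iff] at heq
                exact hip (by omega)
              · exact Or.inr ⟨hm', hb⟩
      · constructor
        · rintro (hx | hx)
          · exact Or.inl hx
          · exact Or.inr ⟨List.mem_cons_of_mem _ hx.1, hx.2⟩
        · rintro (hx | ⟨hm, hb⟩)
          · exact Or.inl hx
          · rcases List.mem_cons.mp hm with heq | hm'
            · exfalso
              rw [Prod.ext_iff] at heq
              omega
            · exact Or.inr ⟨hm', hb⟩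

theorem pv_final (ij : List (Int × Int × Int)) (N : Int) : make_ijk ij N = make_ijk_alt ij N := by
  have hG : pvGOOD N (PySem.Dict.ofList (ij.map (fun t => ((t.1, t.2.1), t.2.2))))
      ((PySem.Dict.ofList (ij.map (fun t => ((t.1, t.2.1), t.2.2)))).keys.foldl (pvBuildRC N)
        (PySem.Dict.empty, PySem.Dict.empty)).1
      ((PySem.Dict.ofList (ij.map (fun t => ((t.1, t.2.1), t.2.2)))).keys.foldl (pvBuildRC N)
        (PySem.Dict.empty, PySem.Dict.empty)).2 0 := by
    intro i hi
    obtain ⟨g1, g2, g3, g4⟩ := pv_build N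
      (PySem.Dict.ofList (ij.map (fun t => ((t.1, t.2.1), t.2.2)))).keys
      (PySem.Dict.empty, PySem.Dict.empty)
      (fun i => by constructor <;> rw [PySem.Dict.getD_empty] <;> exact List.nodup_nil) i
    refine ⟨⟨g1, ?_⟩, ⟨g2, ?_⟩⟩
    · intro x
      rw [g3 x]
      constructor
      · rintro (h | ⟨hm, -, h2, h3⟩)
        · rw [PySem.Dict.getD_empty] at h
          exact absurd h (List.not_mem_nil)
        · exact ⟨h2, h3, (PySem.Dict.contains_iff_mem_keys _ _).mpr hm⟩
      · rintro ⟨h1, h2, h3⟩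
        exact Or.inr ⟨(PySem.Dict.contains_iff_mem_keys _ _).mp h3, hi, h1, h2⟩
    · intro x
      rw [g4 x]
      constructor
      · rintro (h | ⟨hm, -, h2, h3⟩)
        · rw [PySem.Dict.getD_empty] at h
          exact absurd h (List.not_mem_nil)
        · exact ⟨h2, h3, (PySem.Dict.contains_iff_mem_keys _ _).mpr hm⟩
      · rintro ⟨h1, h2, h3⟩
        exact Or.inr ⟨(PySem.Dict.contains_iff_mem_keys _ _).mp h3, hi, h1, h2⟩
  have key := pv_main N (N - 0).toNat 0 rfl
    ((PySem.Dict.ofList (ij.map (fun t => ((t.1, t.2.1), t.2.2))),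
        ((PySem.Dict.ofList (ij.map (fun t => ((t.1, t.2.1), t.2.2)))).size : Int)),
      (PySem.Dict.ofList (ij.map (fun t => ((t.1, t.2.1), t.2.2)))).keys.foldl (pvBuildRC N)
        (PySem.Dict.empty, PySem.Dict.empty))
    (PySem.Dict.nodup_keys_ofList _) hG
  show ((PySem.List.pyRange 0 N 1).foldl (pvStepA N)
        (PySem.Dict.ofList (ij.map (fun t => ((t.1, t.2.1), t.2.2))),
          ((PySem.Dict.ofList (ij.map (fun t => ((t.1, t.2.1), t.2.2)))).size : Int))).1.items.map
      (fun p => (p.1.1, p.1.2, p.2))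
    = ((PySem.List.pyRange 0 N 1).foldl pvStepB
        ((PySem.Dict.ofList (ij.map (fun t => ((t.1, t.2.1), t.2.2))),
            ((PySem.Dict.ofList (ij.map (fun t => ((t.1, t.2.1), t.2.2)))).size : Int)),
          (PySem.Dict.ofList (ij.map (fun t => ((t.1, t.2.1), t.2.2)))).keys.foldl (pvBuildRC N)
            (PySem.Dict.empty, PySem.Dict.empty))).1.1.items.map
      (fun p => (p.1.1, p.1.2, p.2))
  rw [← key]

-- ===== VERDICT (by name: the statement is the Claim_ definition above) =====
theorem make_ijk_spec : Claim_equal_make_ijk := by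
  intro ij N _
  show make_ijk ij N = make_ijk_alt ij N
  exact pv_final ij N
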